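-- pv_equiv track=rewrite | github.com/brightlikethelight/music21-mcp-server | src/music21_mcp/core/rhythm_analyzer.py | _is_ostinato
-- ===== SOURCE A (Python) =====
-- from typing import Dict, List, Any, Optional, Union, Tuple, Set
--
-- def _is_ostinato(occurrences: List[int]) -> bool:
--     """Check if pattern occurrences suggest an ostinato"""
--     if len(occurrences) < 4:
--         return False
--
--     # Check for consecutive occurrences
--     sorted_occ = sorted(set(occurrences))
--     consecutive_count = 1
--     max_consecutive = 1
--
--     for i in range(1, len(sorted_occ)):
--         if sorted_occ[i] == sorted_occ[i-1] + 1: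
--             consecutive_count += 1
--             max_consecutive = max(max_consecutive, consecutive_count)
--         else:
--             consecutive_count = 1
--
--     return max_consecutive >= 4
-- ===== SOURCE B (Python) =====
-- def _is_ostinato(occurrences):
--     """Check if pattern occurrences suggest an ostinato"""
--     if len(occurrences) < 4:
--         return False
--     s = set(occurrences)
--     return any(v + 1 in s and v + 2 in s and v + 3 in s for v in s)
-- ===== Notes on version B (the rewrite author's own statement) =====
-- stated objective: faster
-- what changed: Replaces sort-then-scan run counting with a direct set-membership test: max_consecutive >= 4 iff some value v has v+1, v+2, v+3 also present, so B checks that with any() over the set, with no sorting and no counters.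
import Mathlib
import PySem

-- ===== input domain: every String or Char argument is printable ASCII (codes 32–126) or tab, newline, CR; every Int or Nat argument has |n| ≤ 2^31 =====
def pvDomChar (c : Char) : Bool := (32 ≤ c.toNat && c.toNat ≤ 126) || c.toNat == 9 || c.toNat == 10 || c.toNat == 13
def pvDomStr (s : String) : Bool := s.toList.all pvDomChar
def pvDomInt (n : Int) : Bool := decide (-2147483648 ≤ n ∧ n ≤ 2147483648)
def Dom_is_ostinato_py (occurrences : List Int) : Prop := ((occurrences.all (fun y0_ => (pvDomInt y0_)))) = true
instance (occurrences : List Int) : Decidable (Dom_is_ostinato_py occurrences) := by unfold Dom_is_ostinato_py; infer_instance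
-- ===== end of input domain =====

-- B replaces A's sort-then-scan run counting by a direct set-membership test
-- (some v has v+1, v+2, v+3 also in the set), avoiding the sort; objective: faster (measured).

-- ===== PORT A =====
def is_ostinato_py (occurrences : List Int) : Bool :=
  if occurrences.length < 4 then false
  else
    let sorted_occ := PySem.List.sorted (PySem.Set.ofList occurrences) (fun x => x) false
    let st := (PySem.List.pyRange 1 (sorted_occ.length : Int) 1).foldl
      (fun (p : Int × Int) i =>
        if PySem.List.pyGetD sorted_occ i 0 = PySem.List.pyGetD sorted_occ (i - 1) 0 + 1 then
          (p.1 + 1, max p.2 (p.1 + 1))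
        else (1, p.2))
      (1, 1)
    decide (4 ≤ st.2)

-- ===== PORT B =====
def is_ostinato_py_alt (occurrences : List Int) : Bool :=
  if occurrences.length < 4 then false
  else
    let s := PySem.Set.ofList occurrences
    s.any (fun v => s.contains (v + 1) && s.contains (v + 2) && s.contains (v + 3))

-- ===== PRECONDITION & SPEC =====
def Spec_is_ostinato_py (occurrences : List Int) (out : Bool) : Prop := out = is_ostinato_py_alt occurrences
instance (occurrences : List Int) (out : Bool) : Decidable (Spec_is_ostinato_py occurrences out) := by unfold Spec_is_ostinato_py; infer_instance

-- ===== CLAIM (what is proved, stated in full; the proofs are below) =====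
def Claim_equal_is_ostinato_py : Prop := ∀ (occurrences : List Int), Dom_is_ostinato_py occurrences → Spec_is_ostinato_py occurrences (is_ostinato_py occurrences)

-- ===== LEMMAS AND PROOFS =====

-- proof-only recursion over the sorted list mirroring A's index loop
def pvScan (prev : Int) (p : Int × Int) : List Int → Int × Int
  | [] => p
  | x :: t =>
      if x = prev + 1 then pvScan x (p.1 + 1, max p.2 (p.1 + 1)) t
      else pvScan x (1, p.2) t

-- A's foldl over pyRange 1 len with indexing equals pvScan over the tail
theorem pvBridge (l : List Int) : ∀ (t : List Int) (j : Nat) (prev : Int) (p : Int × Int),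
    1 ≤ j → l.drop (j - 1) = prev :: t →
    (PySem.List.pyRange (j : Int) (l.length : Int) 1).foldl
      (fun (p : Int × Int) i =>
        if PySem.List.pyGetD l i 0 = PySem.List.pyGetD l (i - 1) 0 + 1 then
          (p.1 + 1, max p.2 (p.1 + 1))
        else (1, p.2)) p
      = pvScan prev p t := by
  intro t
  induction t with
  | nil =>
    intro j prev p hj hd
    have hlen : l.length = j := by
      have := congrArg List.length hd
      simp [List.length_drop] at this
      omega
    have : PySem.List.pyRange (j : Int) (l.length : Int) 1 = [] := by
      simp [hlen, PySem.List.pyRange]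
    simp [this, pvScan]
  | cons x t ih =>
    intro j prev p hj hd
    have hlt : j < l.length := by
      have := congrArg List.length hd
      simp [List.length_drop] at this
      omega
    have hprev : l[j - 1]? = some prev := by
      have h0 : (l.drop (j - 1))[0]? = some prev := by simp [hd]
      rw [List.getElem?_drop] at h0
      simpa using h0
    have hx : l[j]? = some x := by
      have h1 : (l.drop (j - 1))[1]? = some x := by simp [hd]
      rw [List.getElem?_drop] at h1
      have : j - 1 + 1 = j := by omega
      rwa [this] at h1
    have hcons : PySem.List.pyRange (j : Int) (l.length : Int) 1
        = (j : Int) :: PySem.List.pyRange ((j : Int) + 1) (l.length : Int) 1 :=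
      PySem.List.pyRange_one_cons (by exact_mod_cast hlt)
    have hgj : PySem.List.pyGetD l (j : Int) 0 = x := by
      rw [PySem.List.pyGetD_natCast]
      simp [List.getD, hx]
    have hgj1 : PySem.List.pyGetD l ((j : Int) - 1) 0 = prev := by
      have : (j : Int) - 1 = ((j - 1 : Nat) : Int) := by omega
      rw [this, PySem.List.pyGetD_natCast]
      simp [List.getD, hprev]
    have hdrop : l.drop ((j + 1) - 1) = x :: t := by
      have : l.drop j = (l.drop (j - 1)).drop 1 := by
        rw [List.drop_drop]
        congr 1
        omega
      simp [this, hd]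
    have hsucc : ((j : Int) + 1) = ((j + 1 : Nat) : Int) := by push_cast; ring
    rw [hcons]
    simp only [List.foldl_cons, hgj, hgj1]
    by_cases hb : x = prev + 1
    · rw [if_pos hb, hsucc, ih (j + 1) x _ (by omega) hdrop]
      simp [pvScan, hb]
    · rw [if_neg hb, hsucc, ih (j + 1) x _ (by omega) hdrop]
      simp [pvScan, hb]

theorem pvScan_mono (t : List Int) : ∀ (prev : Int) (p : Int × Int), p.2 ≤ (pvScan prev p t).2 := by
  induction t with
  | nil => intro prev p; simp [pvScan]
  | cons x t ih =>
    intro prev p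
    simp only [pvScan]
    by_cases hb : x = prev + 1
    · rw [if_pos hb]
      calc p.2 ≤ max p.2 (p.1 + 1) := le_max_left _ _
        _ ≤ _ := ih x (p.1 + 1, max p.2 (p.1 + 1))
    · rw [if_neg hb]; exact ih x (1, p.2)

-- soundness: a max_consecutive ≥ 4 yields a chain of four consecutive members
theorem pvScan_sound (S : List Int) : ∀ (t : List Int) (prev : Int) (cc mc : Int),
    0 < cc → (∀ k : Int, 0 ≤ k → k < cc → prev - k ∈ S) → (∀ x ∈ t, x ∈ S) →
    4 ≤ (pvScan prev (cc, mc) t).2 →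
    4 ≤ mc ∨ ∃ v, v ∈ S ∧ v + 1 ∈ S ∧ v + 2 ∈ S ∧ v + 3 ∈ S := by
  intro t
  induction t with
  | nil =>
    intro prev cc mc _ _ _ h
    simp [pvScan] at h
    exact Or.inl h
  | cons x t ih =>
    intro prev cc mc hcc hrun hmem h
    simp only [pvScan] at h
    by_cases hb : x = prev + 1
    · rw [if_pos hb] at h
      have hrun' : ∀ k : Int, 0 ≤ k → k < cc + 1 → x - k ∈ S := by
        intro k hk0 hk
        by_cases hk1 : k = 0
        · subst hk1; simpa using hmem x (by simp)
        · have : x - k = prev - (k - 1) := by omega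
          rw [this]
          exact hrun (k - 1) (by omega) (by omega)
      rcases ih x (cc + 1) (max mc (cc + 1)) (by omega) hrun'
          (fun y hy => hmem y (by simp [hy])) h with hmx | hex
      · rcases le_max_iff.mp hmx with h1 | h2
        · exact Or.inl h1
        · refine Or.inr ⟨x - 3, ?_, ?_, ?_, ?_⟩
          · exact hrun' 3 (by norm_num) (by omega)
          · have hh := hrun' 2 (by norm_num) (by omega)
            have he : x - 3 + 1 = x - 2 := by ring
            rw [he]; exact hh
          · have hh := hrun' 1 (by norm_num) (by omega)
            have he : x - 3 + 2 = x - 1 := by ring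
            rw [he]; exact hh
          · simpa using hrun' 0 (by norm_num) (by omega)
      · exact Or.inr hex
    · rw [if_neg hb] at h
      exact ih x 1 mc (by norm_num)
        (by intro k hk0 hk; have : k = 0 := by omega
            subst this; simpa using hmem x (by simp))
        (fun y hy => hmem y (by simp [hy])) h

-- completeness (walking part): prev + 1, …, prev + r still needed, cc already ≥ 4 - r
theorem pvScan_walk : ∀ (t : List Int) (prev cc mc : Int) (r : Nat),
    0 < r → (r : Int) ≤ 3 → 4 - (r : Int) ≤ cc →
    (∀ k : Nat, 1 ≤ k → k ≤ r → prev + (k : Int) ∈ t) →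
    (prev :: t).Pairwise (· < ·) →
    4 ≤ (pvScan prev (cc, mc) t).2 := by
  intro t
  induction t with
  | nil =>
    intro prev cc mc r hr _ _ hch _
    exact absurd (hch 1 le_rfl hr) (by simp)
  | cons x t ih =>
    intro prev cc mc r hr hr3 hcc hch hpw
    have hx1 : prev + 1 ∈ x :: t := by
      have := hch 1 le_rfl hr
      simpa using this
    have hpx : prev < x := (List.pairwise_cons.mp hpw).1 x (by simp)
    have hxt : ∀ y ∈ t, x < y := (List.pairwise_cons.mp (List.pairwise_cons.mp hpw).2).1
    have hxe : x = prev + 1 := by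
      rcases List.mem_cons.mp hx1 with h | h
      · omega
      · have := hxt _ h; omega
    simp only [pvScan, if_pos hxe]
    by_cases hr1 : r = 1
    · have h4 : 4 ≤ max mc (cc + 1) := by
        subst hr1
        have : (3 : Int) ≤ cc := by push_cast at hcc; omega
        omega
      calc (4 : Int) ≤ max mc (cc + 1) := h4
        _ ≤ _ := pvScan_mono t x (cc + 1, max mc (cc + 1))
    · apply ih x (cc + 1) (max mc (cc + 1)) (r - 1) (by omega)
        (by omega) (by omega)
      · intro k hk1 hkr
        have hmem : prev + ((k + 1 : Nat) : Int) ∈ x :: t := hch (k + 1) (by omega) (by omega)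
        have hne : prev + ((k + 1 : Nat) : Int) ≠ x := by push_cast; omega
        have : x + (k : Int) = prev + ((k + 1 : Nat) : Int) := by push_cast; omega
        rw [this]
        rcases List.mem_cons.mp hmem with h | h
        · exact absurd h hne
        · exact h
      · exact (List.pairwise_cons.mp hpw).2

-- completeness: a chain of four consecutive members forces max_consecutive ≥ 4
theorem pvScan_complete : ∀ (t : List Int) (prev cc mc v : Int),
    1 ≤ cc → (prev :: t).Pairwise (· < ·) →
    v ∈ prev :: t → v + 1 ∈ prev :: t → v + 2 ∈ prev :: t → v + 3 ∈ prev :: t →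
    4 ≤ (pvScan prev (cc, mc) t).2 := by
  intro t
  induction t with
  | nil =>
    intro prev cc mc v _ _ h0 h1 _ _
    simp at h0 h1
    omega
  | cons x t ih =>
    intro prev cc mc v hcc hpw h0 h1 h2 h3
    have hgt : ∀ w, prev < w → w ∈ prev :: x :: t → w ∈ x :: t := by
      intro w hw hmem
      rcases List.mem_cons.mp hmem with h | h
      · omega
      · exact h
    by_cases hv : v = prev
    · subst hv
      apply pvScan_walk (x :: t) v cc mc 3 (by norm_num) (by norm_num) (by omega) _ hpw
      intro k hk1 hk3
      interval_cases k
      · exact hgt _ (by omega) (by exact_mod_cast h1)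
      · exact hgt _ (by omega) (by exact_mod_cast h2)
      · exact hgt _ (by omega) (by exact_mod_cast h3)
    · have hvm : v ∈ x :: t := by
        rcases List.mem_cons.mp h0 with h | h
        · exact absurd h hv
        · exact h
      have hprevlt : prev < v := by
        have := (List.pairwise_cons.mp hpw).1 v hvm
        exact this
      have h1' : v + 1 ∈ x :: t := hgt _ (by omega) h1
      have h2' : v + 2 ∈ x :: t := hgt _ (by omega) h2
      have h3' : v + 3 ∈ x :: t := hgt _ (by omega) h3
      have hpw' : (x :: t).Pairwise (· < ·) := (List.pairwise_cons.mp hpw).2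
      simp only [pvScan]
      by_cases hb : x = prev + 1
      · rw [if_pos hb]
        exact ih x (cc + 1) (max mc (cc + 1)) v (by omega) hpw' hvm h1' h2' h3'
      · rw [if_neg hb]
        exact ih x 1 mc v le_rfl hpw' hvm h1' h2' h3'

-- ===== VERDICT (by name: the statement is the Claim_ definition above) =====
theorem is_ostinato_py_spec : Claim_equal_is_ostinato_py := by
  intro occurrences _
  unfold Spec_is_ostinato_py is_ostinato_py is_ostinato_py_alt
  by_cases hlen : occurrences.length < 4
  · simp [hlen]
  · simp only [if_neg hlen]
    set l := PySem.List.sorted (PySem.Set.ofList occurrences) (fun x => x) false with hl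
    have hmem_l : ∀ x, x ∈ l ↔ x ∈ occurrences := by
      intro x
      rw [hl, PySem.List.mem_sorted, PySem.Set.mem_ofList]
    have hne : occurrences ≠ [] := by
      intro h; rw [h] at hlen; simp at hlen
    have hlne : l ≠ [] := by
      intro h
      rw [hl, PySem.List.sorted_eq_nil_iff] at h
      rcases List.exists_mem_of_ne_nil occurrences hne with ⟨a, ha⟩
      have : a ∈ PySem.Set.ofList occurrences := (PySem.Set.mem_ofList occurrences a).mpr ha
      simp [h] at this
    obtain ⟨h, t, hht⟩ := List.exists_cons_of_ne_nil hlne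
    have hpw : (h :: t).Pairwise (· < ·) := by
      rw [← hht, hl]
      exact PySem.List.sorted_ofList_pairwise_lt occurrences
    have hbr := pvBridge l t 1 h ((1 : Int), (1 : Int)) le_rfl (by simpa using hht)
    rw [hht] at hbr
    rw [show ((1 : Nat) : Int) = (1 : Int) by norm_num] at hbr
    rw [hht, hbr]
    have hiff : (4 ≤ (pvScan h (1, 1) t).2) ↔
        (PySem.Set.ofList occurrences).any
          (fun v => ((PySem.Set.ofList occurrences).contains (v + 1) &&
                     (PySem.Set.ofList occurrences).contains (v + 2) &&
                     (PySem.Set.ofList occurrences).contains (v + 3))) = true := by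
      constructor
      · intro hs
        rcases pvScan_sound occurrences t h 1 1 one_pos
            (by intro k hk0 hk1
                have : k = 0 := by omega
                subst this
                simpa using (hmem_l h).mp (by rw [hht]; simp))
            (by intro x hx
                exact (hmem_l x).mp (by rw [hht]; simp [hx])) hs with h4 | ⟨v, hv0, hv1, hv2, hv3⟩
        · omega
        · rw [List.any_eq_true]
          refine ⟨v, (PySem.Set.mem_ofList occurrences v).mpr hv0, ?_⟩
          simp only [Bool.and_eq_true]
          exact ⟨⟨List.contains_iff_mem.mpr ((PySem.Set.mem_ofList occurrences (v+1)).mpr hv1),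
                  List.contains_iff_mem.mpr ((PySem.Set.mem_ofList occurrences (v+2)).mpr hv2)⟩,
                  List.contains_iff_mem.mpr ((PySem.Set.mem_ofList occurrences (v+3)).mpr hv3)⟩
      · intro hany
        rw [List.any_eq_true] at hany
        rcases hany with ⟨v, hvs, hvp⟩
        simp only [Bool.and_eq_true] at hvp
        have hv0 : v ∈ occurrences := (PySem.Set.mem_ofList occurrences v).mp hvs
        have hv1 : v + 1 ∈ occurrences := (PySem.Set.mem_ofList occurrences (v+1)).mp (List.contains_iff_mem.mp hvp.1.1)
        have hv2 : v + 2 ∈ occurrences := (PySem.Set.mem_ofList occurrences (v+2)).mp (List.contains_iff_mem.mp hvp.1.2)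
        have hv3 : v + 3 ∈ occurrences := (PySem.Set.mem_ofList occurrences (v+3)).mp (List.contains_iff_mem.mp hvp.2)
        exact pvScan_complete t h 1 1 v le_rfl hpw
          (by rw [← hht]; exact (hmem_l v).mpr hv0)
          (by rw [← hht]; exact (hmem_l (v+1)).mpr hv1)
          (by rw [← hht]; exact (hmem_l (v+2)).mpr hv2)
          (by rw [← hht]; exact (hmem_l (v+3)).mpr hv3)
    simp only [PySem.Set.ofList] at hiff ⊢
    rw [Bool.eq_iff_iff]
    simpa using hiff
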